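-- pv_equiv track=rewrite | github.com/piechnikk/agh-algorithms-and-data-structures | 3_dynamic_and_greedy_algorithms/lab12/selection_of_tasks_with_deadlines.py | select_optimal_tasks
-- ===== SOURCE A (Python) =====
-- def select_optimal_tasks(T:list):
--     max_time = max(T)[0]
--     done = []
--     for time in range(max_time, -1, -1):
--         # if there are no more tasks, terminate the algorithm
--         if len(T) == 0:
--             break
--         # gives list of tasks that have a deadline now or later than the time considered now
--         possible_tasks = list(filter(lambda x: x[1][0]>=time, enumerate(T)))
--         # if there are no tasks with that deadline
--         if len(possible_tasks) == 0:
--             continue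
--         # take the most profitable task add it to done array and remove it from T array
--         i, best = max(possible_tasks, key=lambda x: x[1][1])
--         done.append(best)
--         T.pop(i)
--     return done
-- ===== SOURCE B (Python) =====
-- def select_optimal_tasks(T: list):
--     # Sort once by profit descending (stable, so ties keep original order),
--     # then sweep the time slots high-to-low, taking the first still-eligible
--     # task of the sorted list; slots with no eligible task are skipped in one
--     # jump to the largest remaining deadline.  Does not mutate T (A pops from it).
--     S = sorted(T, key=lambda task: -task[1])
--     t = max(d for d, _ in T)          # raises ValueError on empty input, like A
--     done = []
--     while t >= 0 and S:
--         i = next((j for j, task in enumerate(S) if task[0] >= t), None)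
--         if i is None:
--             t = max(task[0] for task in S)   # skip empty slots; strictly smaller
--         else:
--             done.append(S.pop(i))
--             t -= 1
--     return done
-- ===== Notes on version B (the rewrite author's own statement) =====
-- stated objective: faster
-- what changed: A rescans the remaining tasks (filter over enumerate + max with key) once per time slot for every slot from max deadline down to 0; B sorts the tasks once by profit descending (stable), takes the first still-eligible task of that sorted list per useful slot, and jumps over runs of empty slots directly to the largest remaining deadline, so its cost no longer depends on the deadline magnitude D.
-- outside the precondition, e.g. on select_optimal_tasks([]): A raises ValueError, B raises ValueError
import Mathlib
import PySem

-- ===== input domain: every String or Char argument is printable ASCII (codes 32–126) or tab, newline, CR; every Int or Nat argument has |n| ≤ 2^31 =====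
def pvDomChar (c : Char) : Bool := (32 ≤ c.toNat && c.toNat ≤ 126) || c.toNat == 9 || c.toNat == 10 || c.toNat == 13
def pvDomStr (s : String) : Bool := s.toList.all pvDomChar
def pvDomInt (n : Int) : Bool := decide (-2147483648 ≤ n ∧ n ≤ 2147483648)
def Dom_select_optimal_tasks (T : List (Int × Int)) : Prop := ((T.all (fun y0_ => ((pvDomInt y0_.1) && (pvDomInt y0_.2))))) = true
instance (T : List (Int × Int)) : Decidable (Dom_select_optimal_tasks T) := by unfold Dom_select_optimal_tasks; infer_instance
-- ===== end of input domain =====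

-- B replaces A's per-slot filter+argmax rescans by one stable sort by profit and a
-- sweep that jumps over empty slots (objective: faster). Equivalence is about the
-- RETURN value only: Python A pops the selected tasks from its argument list T,
-- Python B works on a sorted copy and leaves T untouched.

-- ===== PORT A =====
-- for time in range(max_time, -1, -1): fuel = time+1 (fuel 0 ⇔ time < 0, loop over)
def pvGoA : Nat → List (Int × Int) → List (Int × Int)
  | 0, _ => []
  | n+1, T =>
    if T.length = 0 then []                               -- if len(T)==0: break
    else
      -- possible_tasks = list(filter(lambda x: x[1][0]>=time, enumerate(T)))
      let possible := (PySem.List.enumerate T).filter (fun x => decide (x.2.1 ≥ (n : Int)))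
      if possible.length = 0 then pvGoA n T               -- continue
      else
        -- i, best = max(possible_tasks, key=lambda x: x[1][1])
        match PySem.List.max? possible (fun x => x.2.2) with
        | none => []                                      -- unreachable: possible ≠ []
        | some (i, best) =>
          match PySem.List.pop? T i with                  -- T.pop(i)
          | none => []                                    -- unreachable: i is a valid index
          | some (_, T') => best :: pvGoA n T'            -- done.append(best)

def select_optimal_tasks (T : List (Int × Int)) : List (Int × Int) :=
  -- max_time = max(T)[0]  (max of tuples: lexicographic; raises ValueError on [])
  match PySem.List.max2? T (fun x => x.1) (fun x => x.2) with
  | none => []                                            -- Python raises; excluded by Pre_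
  | some m => if m.1 < 0 then [] else pvGoA (m.1.toNat + 1) T

-- ===== PORT B =====
def pvGoB : Nat → Int → List (Int × Int) → List (Int × Int)
  -- while t >= 0 and S:  (fuel only bounds the iteration count — t strictly
  -- decreases each iteration, so fuel = initial t + 1 is never exhausted)
  | 0, _, _ => []
  | n+1, t, S =>
    if t < 0 then []
    else if S.isEmpty then []
    else
      -- i = next((j for j, task in enumerate(S) if task[0] >= t), None)
      match (PySem.List.enumerate S).find? (fun z => decide (z.2.1 ≥ t)) with
      | some (i, _) =>
        match PySem.List.pop? S i with                    -- done.append(S.pop(i)); t -= 1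
        | none => []                                      -- unreachable: i is a valid index
        | some (x, S') => x :: pvGoB n (t - 1) S'
      | none =>
        -- t = max(task[0] for task in S)  (skip empty slots)
        let m := (PySem.List.max? (S.map (fun y : Int × Int => y.1)) (fun v => v)).getD 0
        pvGoB n m S

def select_optimal_tasks_alt (T : List (Int × Int)) : List (Int × Int) :=
  -- S = sorted(T, key=lambda task: -task[1]); t = max(d for d, _ in T)
  match PySem.List.max? (T.map (fun y : Int × Int => y.1)) (fun v => v) with
  | none => []                                            -- Python raises; excluded by Pre_
  | some t0 => pvGoB (t0.toNat + 1) t0 (PySem.List.sorted T (fun task => -task.2))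

-- ===== PRECONDITION & SPEC =====
-- Pre_ excludes only the empty list, on which both Pythons raise ValueError (max of
-- an empty sequence).
def Pre_select_optimal_tasks (T : List (Int × Int)) : Prop := T ≠ []
instance (T : List (Int × Int)) : Decidable (Pre_select_optimal_tasks T) := by unfold Pre_select_optimal_tasks; infer_instance
def pvWitness_select_optimal_tasks : (List (Int × Int)) := [(1, 2)]

def Spec_select_optimal_tasks (T : List (Int × Int)) (out : List (Int × Int)) : Prop := out = select_optimal_tasks_alt T
instance (T : List (Int × Int)) (out : List (Int × Int)) : Decidable (Spec_select_optimal_tasks T out) := by unfold Spec_select_optimal_tasks; infer_instance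

-- ===== CLAIM (what is proved, stated in full; the proofs are below) =====
def Claim_equal_select_optimal_tasks : Prop := ∀ (T : List (Int × Int)), Dom_select_optimal_tasks T → Pre_select_optimal_tasks T → Spec_select_optimal_tasks T (select_optimal_tasks T)

-- ===== LEMMAS AND PROOFS =====

-- The invariant tying A's remaining task list T to B's remaining sorted list S:
-- every profit class appears as the SAME subsequence in both (hence S is a
-- permutation of T), and S is sorted by profit descending.
def pvInv (T S : List (Int × Int)) : Prop :=
  (∀ p : Int, T.filter (fun y => decide (y.2 = p)) = S.filter (fun y => decide (y.2 = p))) ∧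
  S.Pairwise (fun a b => (-a.2 : Int) ≤ -b.2)

theorem pvInv_perm {T S : List (Int × Int)} (h : pvInv T S) : T.Perm S := by
  rcases h with ⟨hf, -⟩
  rw [List.perm_iff_count]
  intro a
  have h1 : List.count a T = List.count a (T.filter (fun y => decide (y.2 = a.2))) :=
    (List.count_filter (by simp)).symm
  rw [h1, hf a.2, List.count_filter (by simp)]

-- max? keeps the FIRST maximal element: the list splits with a strictly smaller prefix.
-- helper: the running 'first max' of Python's max(..., key=...) loop
theorem pvMaxFirstAux {α : Type} (key : α → Int) (f : Option α → α → Option α)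
    (hstep : ∀ (mm x : α), f (some mm) x = if key mm < key x then some x else some mm) :
    ∀ (xs : List α) (a m : α),
      xs.foldl f (some a) = some m →
      (m = a ∧ ∀ y ∈ xs, key y ≤ key a) ∨
      (∃ l₁ l₂, xs = l₁ ++ m :: l₂ ∧ key a < key m ∧ (∀ y ∈ l₁, key y < key m) ∧
        (∀ y ∈ l₂, key y ≤ key m))
  | [], a, m => by
    intro h
    simp at h
    exact Or.inl ⟨h.symm, by simp⟩
  | x :: xs, a, m => by
    intro h
    simp only [List.foldl_cons, hstep] at h
    by_cases hc : key a < key x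
    · rw [if_pos hc] at h
      rcases pvMaxFirstAux key f hstep xs x m h with ⟨rfl, hall⟩ | ⟨l₁, l₂, rfl, hlt, hpre, hsuf⟩
      · exact Or.inr ⟨[], xs, rfl, hc, by simp, hall⟩
      · exact Or.inr ⟨x :: l₁, l₂, rfl, lt_trans hc hlt,
          by intro y hy; rcases List.mem_cons.mp hy with rfl | hy
             · exact hlt
             · exact hpre y hy, hsuf⟩
    · rw [if_neg hc] at h
      have hxa : key x ≤ key a := le_of_not_gt hc
      rcases pvMaxFirstAux key f hstep xs a m h with ⟨rfl, hall⟩ | ⟨l₁, l₂, rfl, hlt, hpre, hsuf⟩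
      · refine Or.inl ⟨rfl, ?_⟩
        intro y hy
        rcases List.mem_cons.mp hy with rfl | hy
        · exact hxa
        · exact hall y hy
      · exact Or.inr ⟨x :: l₁, l₂, rfl, hlt,
          by intro y hy; rcases List.mem_cons.mp hy with rfl | hy
             · exact lt_of_le_of_lt hxa hlt
             · exact hpre y hy, hsuf⟩

theorem pvMaxFirst {α : Type} (key : α → Int) (xs : List α) (m : α)
    (h : PySem.List.max? xs key = some m) :
    ∃ l₁ l₂, xs = l₁ ++ m :: l₂ ∧ (∀ y ∈ l₁, key y < key m) ∧ (∀ y ∈ l₂, key y ≤ key m) := by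
  unfold PySem.List.max? at h
  cases xs with
  | nil => simp at h
  | cons x t =>
    simp only [List.foldl_cons] at h
    rcases pvMaxFirstAux key _ (fun mm x => rfl) t x m h with ⟨rfl, hall⟩ | ⟨l₁, l₂, rfl, _, hpre, hsuf⟩
    · exact ⟨[], t, rfl, by simp, hall⟩
    · exact ⟨x :: l₁, l₂, rfl,
        by intro y hy; rcases List.mem_cons.mp hy with rfl | hy
           · assumption
           · exact hpre y hy, hsuf⟩

-- helpers for the lexicographic max(T) of Port A
theorem pvMax2Aux (f : Option (Int × Int) → (Int × Int) → Option (Int × Int))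
    (hstep : ∀ (mm x : Int × Int), f (some mm) x =
      if (decide (mm.1 < x.1) || !decide (x.1 < mm.1) && decide (mm.2 < x.2)) = true
      then some x else some mm) :
    ∀ (xs : List (Int × Int)) (a m : Int × Int),
      xs.foldl f (some a) = some m →
      (m = a ∨ m ∈ xs) ∧ a.1 ≤ m.1 ∧ ∀ y ∈ xs, y.1 ≤ m.1
  | [], a, m => by
    intro h
    simp at h
    exact ⟨Or.inl h.symm, le_of_eq (by rw [h]), by simp⟩
  | x :: xs, a, m => by
    intro h
    simp only [List.foldl_cons, hstep] at h
    by_cases hc : (decide (a.1 < x.1) || !decide (x.1 < a.1) && decide (a.2 < x.2)) = true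
    · rw [if_pos hc] at h
      have hax : a.1 ≤ x.1 := by
        rcases Bool.or_eq_true_iff.mp hc with h1 | h1
        · exact le_of_lt (by simpa using h1)
        · exact le_of_not_gt (by simpa using (Bool.and_eq_true_iff.mp h1).1)
      obtain ⟨hmem, hxm, hall⟩ := pvMax2Aux f hstep xs x m h
      refine ⟨?_, le_trans hax hxm, ?_⟩
      · rcases hmem with rfl | hmem
        · exact Or.inr (by simp)
        · exact Or.inr (by simp [hmem])
      · intro y hy
        rcases List.mem_cons.mp hy with rfl | hy
        · exact hxm
        · exact hall y hy
    · rw [if_neg hc] at h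
      have hxa : x.1 ≤ a.1 := by
        have h1 : ¬ a.1 < x.1 := fun hlt => hc (by simp [hlt])
        exact le_of_not_gt h1
      obtain ⟨hmem, ham, hall⟩ := pvMax2Aux f hstep xs a m h
      refine ⟨?_, ham, ?_⟩
      · rcases hmem with rfl | hmem
        · exact Or.inl rfl
        · exact Or.inr (by simp [hmem])
      · intro y hy
        rcases List.mem_cons.mp hy with rfl | hy
        · exact le_trans hxa ham
        · exact hall y hy

theorem pvMax2Some (T : List (Int × Int)) (hT : T ≠ []) :
    ∃ m, PySem.List.max2? T (fun x => x.1) (fun x => x.2) = some m := by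
  have haux : ∀ (f : Option (Int × Int) → (Int × Int) → Option (Int × Int)),
      (∀ (mm x : Int × Int), f (some mm) x =
        if (decide (mm.1 < x.1) || !decide (x.1 < mm.1) && decide (mm.2 < x.2)) = true
        then some x else some mm) →
      ∀ (xs : List (Int × Int)) (a : Int × Int), ∃ m, xs.foldl f (some a) = some m := by
    intro f hstep xs
    induction xs with
    | nil => exact fun a => ⟨a, rfl⟩
    | cons x xs ih =>
      intro a
      simp only [List.foldl_cons, hstep]
      by_cases hc : (decide (a.1 < x.1) || !decide (x.1 < a.1) && decide (a.2 < x.2)) = true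
      · rw [if_pos hc]; exact ih x
      · rw [if_neg hc]; exact ih a
  cases T with
  | nil => exact absurd rfl hT
  | cons x t =>
    unfold PySem.List.max2?
    simp only [List.foldl_cons]
    exact haux _ (fun mm x => rfl) t x

-- the lexicographic max of the pairs has the maximal first component
theorem pvMax2Fst (T : List (Int × Int)) (m : Int × Int)
    (h : PySem.List.max2? T (fun x => x.1) (fun x => x.2) = some m) :
    m ∈ T ∧ ∀ y ∈ T, y.1 ≤ m.1 := by
  unfold PySem.List.max2? at h
  cases T with
  | nil => simp at h
  | cons x t =>
    simp only [List.foldl_cons] at h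
    obtain ⟨hmem, hxm, hall⟩ := pvMax2Aux _ (fun mm x => rfl) t x m h
    refine ⟨?_, ?_⟩
    · rcases hmem with rfl | hmem
      · simp
      · simp [hmem]
    · intro y hy
      rcases List.mem_cons.mp hy with rfl | hy
      · exact hxm
      · exact hall y hy

-- characterisation of A's pick: first maximal-profit eligible task
theorem pvPickA (T : List (Int × Int)) (t i : Int) (best : Int × Int)
    (h : PySem.List.max? ((PySem.List.enumerate T).filter (fun x => decide (x.2.1 ≥ t)))
          (fun x => x.2.2) = some (i, best)) :
    ∃ A₁ A₂, T = A₁ ++ best :: A₂ ∧ i = (A₁.length : Int) ∧ t ≤ best.1 ∧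
      (∀ y ∈ A₁, t ≤ y.1 → y.2 < best.2) ∧ (∀ y ∈ T, t ≤ y.1 → y.2 ≤ best.2) := by
  obtain ⟨P₁, P₂, hsplit, hpre, -⟩ := pvMaxFirst (α := Int × Int × Int) (fun x => x.2.2) _ _ h
  have hmem : (i, best) ∈ (PySem.List.enumerate T).filter (fun x => decide (x.2.1 ≥ t)) := by
    rw [hsplit]; simp
  have hmem' := List.mem_filter.mp hmem
  have helig : t ≤ best.1 := by
    have := hmem'.2
    simpa using this
  obtain ⟨k, hk, hkeq⟩ := (PySem.List.mem_enumerate_iff T 0 (i, best)).mp hmem'.1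
  have hik : i = (k : Int) := by
    have := congrArg Prod.fst hkeq
    simpa using this
  have hbk : T[k]'hk = best := (congrArg Prod.snd hkeq).symm
  have hpw : ((PySem.List.enumerate T).filter (fun x => decide (x.2.1 ≥ t))).Pairwise
      (fun p q => p.1 < q.1) :=
    (PySem.List.pairwise_lt_enumerate T 0).sublist List.filter_sublist
  have hTdec : T = T.take k ++ best :: T.drop (k + 1) := by
    conv_lhs => rw [← List.take_append_drop k T]
    rw [List.drop_eq_getElem_cons hk, hbk]
  have hlen : (T.take k).length = k := List.length_take_of_le (le_of_lt hk)
  -- membership of an arbitrary eligible element of T in the filtered enumeration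
  have hin : ∀ (j : Nat) (hj : j < T.length), t ≤ (T[j]'hj).1 →
      ((j : Int), T[j]'hj) ∈ (PySem.List.enumerate T).filter (fun x => decide (x.2.1 ≥ t)) := by
    intro j hj hel
    refine List.mem_filter.mpr ⟨?_, by simpa using hel⟩
    exact (PySem.List.mem_enumerate_iff T 0 _).mpr ⟨j, hj, by simp⟩
  refine ⟨T.take k, T.drop (k + 1), hTdec, by rw [hlen]; exact hik, helig, ?_, ?_⟩
  · intro y hy hel
    obtain ⟨j, hjl, hjy⟩ := List.mem_iff_getElem.mp hy
    have hjk : j < k := by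
      have := hjl
      rw [List.length_take] at this
      omega
    have hjT : j < T.length := lt_trans hjk hk
    have hyj : T[j]'hjT = y := by
      rw [← hjy, List.getElem_take]
    have hmemj := hin j hjT (by rw [hyj]; exact hel)
    rw [hsplit] at hmemj
    rcases List.mem_append.mp hmemj with hj1 | hj2
    · have := hpre _ hj1
      rw [hsplit] at hpw
      rw [hyj] at this
      simpa using this
    · rcases List.mem_cons.mp hj2 with heq | hj2
      · exfalso
        have := congrArg Prod.fst heq
        simp only at this
        omega
      · exfalso
        rw [hsplit] at hpw
        have hrel := (List.pairwise_append.mp hpw).2.1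
        have := (List.pairwise_cons.mp hrel).1 _ hj2
        simp only at this
        omega
  · intro y hy hel
    obtain ⟨j, hjl, hjy⟩ := List.mem_iff_getElem.mp hy
    have hmemj := hin j hjl (by rw [hjy]; exact hel)
    have := PySem.List.max?_isMax h _ hmemj
    simpa [hjy] using this

-- characterisation of B's pick: first eligible task of S
theorem pvPickB (S : List (Int × Int)) (t i : Int) (x : Int × Int)
    (h : (PySem.List.enumerate S).find? (fun z => decide (z.2.1 ≥ t)) = some (i, x)) :
    ∃ S₁ S₂, S = S₁ ++ x :: S₂ ∧ i = (S₁.length : Int) ∧ t ≤ x.1 ∧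
      ∀ y ∈ S₁, ¬ t ≤ y.1 := by
  obtain ⟨hp, as, bs, hsplit, hpref⟩ := List.find?_eq_some_iff_append.mp h
  have hlen : as.length < (PySem.List.enumerate S 0).length := by
    rw [hsplit]; simp
  have hget : (PySem.List.enumerate S 0)[as.length]'hlen = (i, x) := by
    rw [List.getElem_of_eq hsplit hlen, List.getElem_append_right (le_refl as.length)]
    simp
  have hlenS : as.length < S.length := by
    simpa [PySem.List.length_enumerate] using hlen
  rw [PySem.List.getElem_enumerate S 0 as.length hlen] at hget
  have hi : i = (as.length : Int) := by
    have := congrArg Prod.fst hget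
    simpa using this.symm
  have hx : S[as.length]'hlenS = x := congrArg Prod.snd hget
  refine ⟨as.map (fun z => z.2), bs.map (fun z => z.2), ?_, by simp [hi], by simpa using hp, ?_⟩
  · have hmap := PySem.List.map_snd_enumerate S 0
    rw [hsplit] at hmap
    simpa using hmap.symm
  · intro y hy
    obtain ⟨z, hz, hzy⟩ := List.mem_map.mp hy
    have := hpref z hz
    simp only [Bool.not_eq_eq_eq_not, Bool.not_true, decide_eq_false_iff_not] at this
    rw [hzy] at this
    simpa using this

-- a split at the first element satisfying P is unique
theorem pvSplitUnique {α : Type} (P : α → Prop) (u u' v v' : List α) (a a' : α)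
    (he : u ++ a :: v = u' ++ a' :: v')
    (hu : ∀ y ∈ u, ¬ P y) (hu' : ∀ y ∈ u', ¬ P y) (ha : P a) (ha' : P a') :
    u = u' ∧ a = a' ∧ v = v' := by
  induction u generalizing u' with
  | nil =>
    cases u' with
    | nil => simpa using he
    | cons b u' =>
      exfalso
      have hb : a = b := by simpa using congrArg (fun l => l.head?) he
      exact hu' b (by simp) (hb ▸ ha)
  | cons b u ih =>
    cases u' with
    | nil =>
      exfalso
      have hb : b = a' := by simpa using congrArg (fun l => l.head?) he
      exact hu b (by simp) (hb ▸ ha')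
    | cons b' u' =>
      have hb : b = b' := by simpa using congrArg (fun l => l.head?) he
      have ht : u ++ a :: v = u' ++ a' :: v' := by
        have := congrArg (fun l => l.tail) he
        simpa using this
      obtain ⟨h1, h2, h3⟩ := ih u' ht (fun y hy => hu y (by simp [hy]))
        (fun y hy => hu' y (by simp [hy]))
      exact ⟨by rw [hb, h1], h2, h3⟩

-- inserting x into a profit-sorted list appends it at the end of its profit class
theorem pvInsertFilter (x : Int × Int) (ys : List (Int × Int)) (p : Int)
    (hs : ys.Pairwise (fun a b => (-a.2 : Int) ≤ -b.2)) :
    (PySem.List.insertBy (fun a b => decide ((fun task : Int × Int => -task.2) a < (fun task : Int × Int => -task.2) b)) x ys).filter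
        (fun y => decide (y.2 = p)) =
      ys.filter (fun y => decide (y.2 = p)) ++ if x.2 = p then [x] else [] := by
  induction ys with
  | nil =>
    by_cases hx : x.2 = p <;> simp [PySem.List.insertBy, List.filter, hx]
  | cons y ys ih =>
    rw [PySem.List.insertBy]
    by_cases hb : decide ((fun task : Int × Int => -task.2) x < (fun task : Int × Int => -task.2) y) = true
    · rw [if_pos hb]
      have hyx : y.2 < x.2 := by
        have := of_decide_eq_true hb
        simpa using this
      have hnone : (y :: ys).filter (fun z => decide (z.2 = p)) = [] ∨ x.2 ≠ p := by
        by_cases hx : x.2 = p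
        · left
          rw [List.filter_eq_nil_iff]
          intro z hz
          rcases List.mem_cons.mp hz with rfl | hz
          · simp; omega
          · have hzy : (-y.2 : Int) ≤ -z.2 := (List.pairwise_cons.mp hs).1 z hz
            simp; omega
        · right; exact hx
      by_cases hx : x.2 = p
      · rcases hnone with hnil | hne
        · rw [List.filter_cons, if_pos (by simpa using hx), hnil]
          simp [hx]
        · exact absurd hx hne
      · rw [List.filter_cons, if_neg (by simpa using hx)]
        simp [hx]
    · rw [if_neg hb]
      have htail := ih (List.pairwise_cons.mp hs).2
      rw [List.filter_cons, List.filter_cons]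
      by_cases hy : y.2 = p
      · rw [if_pos (by simpa using hy), if_pos (by simpa using hy)]
        rw [htail, List.cons_append]
      · rw [if_neg (by simpa using hy), if_neg (by simpa using hy)]
        exact htail

-- stability over the whole fold
theorem pvSortedFilterAux :
    ∀ (T pref : List (Int × Int)) (p : Int),
      (PySem.List.sorted (pref ++ T) (fun task => -task.2)).filter (fun y => decide (y.2 = p)) =
        (PySem.List.sorted pref (fun task => -task.2)).filter (fun y => decide (y.2 = p)) ++
          T.filter (fun y => decide (y.2 = p))
  | [], pref, p => by simp
  | x :: T, pref, p => by
    have h1 : pref ++ x :: T = (pref ++ [x]) ++ T := by simp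
    rw [h1, pvSortedFilterAux T (pref ++ [x]) p]
    have h2 : PySem.List.sorted (pref ++ [x]) (fun task => -task.2) =
        PySem.List.insertBy (fun a b => decide ((fun task : Int × Int => -task.2) a < (fun task : Int × Int => -task.2) b)) x
          (PySem.List.sorted pref (fun task => -task.2)) := by
      rw [PySem.List.sorted_eq_foldl_insertBy, PySem.List.sorted_eq_foldl_insertBy, List.foldl_append]
      rfl
    rw [h2, pvInsertFilter x _ p (PySem.List.sorted_pairwise pref (fun task => -task.2))]
    rw [List.filter_cons]
    by_cases hx : x.2 = p <;> simp [hx]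

-- stability of B's sort: every profit class is the same subsequence before and after
theorem pvSortedFilter (T : List (Int × Int)) (p : Int) :
    (PySem.List.sorted T (fun task => -task.2)).filter (fun y => decide (y.2 = p)) =
      T.filter (fun y => decide (y.2 = p)) := by
  have := pvSortedFilterAux T [] p
  simpa [PySem.List.sorted] using this

theorem pvGoA_nil (n : Nat) : pvGoA n [] = [] := by
  cases n <;> simp [pvGoA]

-- A idles through slots no remaining task can fill
theorem pvIdle (n f : Nat) (T : List (Int × Int)) (hle : f ≤ n)
    (hall : ∀ y ∈ T, y.1 < (f : Int)) : pvGoA n T = pvGoA f T := by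
  induction n with
  | zero =>
    have : f = 0 := Nat.le_zero.mp hle
    rw [this]
  | succ k ih =>
    rcases Nat.lt_or_ge k f with hk | hk
    · have : f = k + 1 := by omega
      rw [this]
    · rw [pvGoA]
      by_cases hT : T.length = 0
      · rw [if_pos hT]
        rw [List.length_eq_zero_iff.mp hT, pvGoA_nil]
      · rw [if_neg hT]
        have hposs : ((PySem.List.enumerate T).filter (fun x => decide (x.2.1 ≥ (k : Int)))) = [] := by
          rw [List.filter_eq_nil_iff]
          intro z hz
          have hzmem : z.2 ∈ T := by
            have := PySem.List.map_snd_enumerate T 0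
            rw [← this]
            exact List.mem_map.mpr ⟨z, hz, rfl⟩
          have := hall z.2 hzmem
          simp only [decide_eq_true_eq]
          omega
        rw [hposs]
        simpa using ih hk

theorem pvGoEq : ∀ (fuel : Nat) (t : Int) (T S : List (Int × Int)), pvInv T S → t < (fuel : Int) →
    pvGoA (if t < 0 then 0 else t.toNat + 1) T = pvGoB fuel t S := by
  intro fuel
  induction fuel with
  | zero =>
    intro t T S h hlt
    rw [if_pos (by exact_mod_cast hlt)]
    rfl
  | succ n ih =>
    intro t T S h hlt
    by_cases htneg : t < 0
    · rw [if_pos htneg, pvGoB, if_pos htneg]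
      rfl
    · rw [if_neg htneg, pvGoB, if_neg htneg]
      have ht0 : 0 ≤ t := le_of_not_gt htneg
      have htcast : ((t.toNat : Nat) : Int) = t := Int.toNat_of_nonneg ht0
      have hperm := pvInv_perm h
      by_cases hS : S = []
      · subst hS
        have hT : T = [] := hperm.eq_nil
        subst hT
        rw [pvGoA]
        simp
      · have hT : T ≠ [] := fun hh => hS (((hh ▸ hperm : ([] : List (Int × Int)).Perm S)).symm.eq_nil)
        have hTlen : ¬ (T.length = 0) := by simpa [List.length_eq_zero_iff] using hT
        rw [if_neg (by simpa [List.isEmpty_iff] using hS), pvGoA, if_neg hTlen]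
        simp only [htcast]
        cases hfind : (PySem.List.enumerate S).find? (fun z => decide (z.2.1 ≥ t)) with
        | none =>
          -- no task is eligible at time t (nor, by the invariant, in T)
          have hallS : ∀ y ∈ S, ¬ (t ≤ y.1) := by
            intro y hy
            have hy' : y ∈ List.map (fun z => z.2) (PySem.List.enumerate S) := by
              rw [PySem.List.map_snd_enumerate]
              exact hy
            obtain ⟨z, hz, hzy⟩ := List.mem_map.mp hy'
            have := List.find?_eq_none.mp hfind z hz
            rw [← hzy]
            simpa using this
          have hallT : ∀ y ∈ T, ¬ (t ≤ y.1) := fun y hy => hallS y (hperm.mem_iff.mp hy)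
          have hposs : ((PySem.List.enumerate T).filter (fun x => decide (x.2.1 ≥ t))) = [] := by
            rw [List.filter_eq_nil_iff]
            intro z hz
            have hzmem : z.2 ∈ T := by
              have hz' : z.2 ∈ List.map (fun w => w.2) (PySem.List.enumerate T) :=
                List.mem_map.mpr ⟨z, hz, rfl⟩
              rwa [PySem.List.map_snd_enumerate] at hz'
            have := hallT z.2 hzmem
            simpa using this
          have hplen : ((PySem.List.enumerate T).filter (fun x => decide (x.2.1 ≥ t))).length = 0 := by
            rw [hposs]
            rfl
          rw [if_pos hplen]
          obtain ⟨m, hm⟩ : ∃ m, PySem.List.max? (S.map (fun y : Int × Int => y.1)) (fun v => v) = some m := by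
            cases hmx : PySem.List.max? (S.map (fun y : Int × Int => y.1)) (fun v => v) with
            | none =>
              exact absurd ((PySem.List.max?_eq_none_iff _ _).mp hmx) (by simpa using hS)
            | some m => exact ⟨m, rfl⟩
          obtain ⟨y0, hy0S, hy0⟩ : ∃ y0 ∈ S, y0.1 = m := by
            have := PySem.List.max?_mem hm
            exact List.mem_map.mp this
          have hmmax : ∀ y ∈ S, y.1 ≤ m := by
            intro y hy
            simpa using PySem.List.max?_isMax hm _ (List.mem_map_of_mem hy)
          have hmt : ¬ (t ≤ m) := by
            have := hallS y0 hy0S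
            omega
          have hfk : (if m < 0 then 0 else m.toNat + 1) ≤ t.toNat := by
            split_ifs <;> omega
          have hallf : ∀ y ∈ T, y.1 < (((if m < 0 then 0 else m.toNat + 1) : Nat) : Int) := by
            intro y hy
            have h1 : y.1 ≤ m := hmmax y (hperm.mem_iff.mp hy)
            split_ifs with hm0
            · simp
              omega
            · push_cast
              omega
          have hstep : pvGoA (if m < 0 then 0 else m.toNat + 1) T = pvGoB n m S :=
            ih m T S h (by omega)
          rw [hm]
          exact (pvIdle t.toNat _ T hfk hallf).trans hstep
        | some iz =>
          obtain ⟨i, x⟩ := iz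
          obtain ⟨S₁, S₂, hSsplit, hiS, heligx, hS₁⟩ := pvPickB S t i x hfind
          have hlenS1 : S₁.length < S.length := by rw [hSsplit]; simp
          have hgetS : S[S₁.length]'hlenS1 = x := by
            rw [List.getElem_of_eq hSsplit hlenS1, List.getElem_append_right (le_refl S₁.length)]
            simp
          have hpopB : PySem.List.pop? S i = some (x, S₁ ++ S₂) := by
            rw [hiS, PySem.List.pop?_natCast S S₁.length hlenS1, hgetS]
            have herase : S.eraseIdx S₁.length = S₁ ++ S₂ := by
              rw [hSsplit, List.eraseIdx_append_of_length_le (le_refl S₁.length)]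
              simp
            rw [herase]
          -- the eligible task x also sits in T, so A's filtered list is nonempty
          have hxT : x ∈ T := hperm.mem_iff.mpr (by rw [hSsplit]; simp)
          obtain ⟨j, hj, hjx⟩ := List.mem_iff_getElem.mp hxT
          have hjposs : ((j : Int), x) ∈ (PySem.List.enumerate T).filter (fun z => decide (z.2.1 ≥ t)) := by
            refine List.mem_filter.mpr ⟨?_, by simpa using heligx⟩
            exact (PySem.List.mem_enumerate_iff T 0 _).mpr ⟨j, hj, by simp [hjx]⟩
          have hpossne : ((PySem.List.enumerate T).filter (fun z => decide (z.2.1 ≥ t))) ≠ [] := by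
            intro hh
            rw [hh] at hjposs
            simp at hjposs
          have hplenne : ¬ (((PySem.List.enumerate T).filter (fun z => decide (z.2.1 ≥ t))).length = 0) := by
            simpa [List.length_eq_zero_iff] using hpossne
          rw [if_neg hplenne]
          cases hmax : PySem.List.max? ((PySem.List.enumerate T).filter (fun z => decide (z.2.1 ≥ t))) (fun z => z.2.2) with
          | none => exact absurd ((PySem.List.max?_eq_none_iff _ _).mp hmax) hpossne
          | some ib =>
            obtain ⟨i', best⟩ := ib
            obtain ⟨A₁, A₂, hTsplit, hiA, heligb, hApre, hAmax⟩ := pvPickA T t i' best hmax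
            have hlenA1 : A₁.length < T.length := by rw [hTsplit]; simp
            have hgetT : T[A₁.length]'hlenA1 = best := by
              rw [List.getElem_of_eq hTsplit hlenA1, List.getElem_append_right (le_refl A₁.length)]
              simp
            have hpopA : PySem.List.pop? T i' = some (best, A₁ ++ A₂) := by
              rw [hiA, PySem.List.pop?_natCast T A₁.length hlenA1, hgetT]
              have herase : T.eraseIdx A₁.length = A₁ ++ A₂ := by
                rw [hTsplit, List.eraseIdx_append_of_length_le (le_refl A₁.length)]
                simp
              rw [herase]
            -- the two picks are the same task
            have hx2 : x.2 ≤ best.2 := hAmax x hxT heligx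
            have hbestS : best ∈ S := hperm.mem_iff.mp (by rw [hTsplit]; simp)
            have hb2 : best.2 ≤ x.2 := by
              rw [hSsplit] at hbestS
              rcases List.mem_append.mp hbestS with h1 | h2
              · exact absurd heligb (hS₁ best h1)
              · rcases List.mem_cons.mp h2 with heq | h2
                · rw [heq]
                · have hpw := h.2
                  rw [hSsplit] at hpw
                  have := (List.pairwise_cons.mp (List.pairwise_append.mp hpw).2.1).1 best h2
                  omega
            have hpp : best.2 = x.2 := le_antisymm hb2 hx2
            have hcls := h.1 best.2
            rw [hTsplit, hSsplit, List.filter_append, List.filter_append,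
                List.filter_cons, List.filter_cons,
                if_pos (by simp), if_pos (by simp [hpp])] at hcls
            obtain ⟨hA1S1, hbx, hA2S2⟩ :=
              pvSplitUnique (fun y => t ≤ y.1)
                (A₁.filter (fun y => decide (y.2 = best.2))) (S₁.filter (fun y => decide (y.2 = best.2)))
                (A₂.filter (fun y => decide (y.2 = best.2))) (S₂.filter (fun y => decide (y.2 = best.2)))
                best x hcls
                (by
                  intro y hy
                  have hmem := List.mem_filter.mp hy
                  have hyc : y.2 = best.2 := by simpa using hmem.2
                  intro hel
                  have := hApre y hmem.1 hel
                  omega)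
                (by
                  intro y hy
                  exact hS₁ y (List.mem_filter.mp hy).1)
                heligb heligx
            have hinv' : pvInv (A₁ ++ A₂) (S₁ ++ S₂) := by
              constructor
              · intro p
                rw [List.filter_append, List.filter_append]
                by_cases hp : p = best.2
                · subst hp
                  rw [hA1S1, hA2S2]
                · have hcp := h.1 p
                  rw [hTsplit, hSsplit, List.filter_append, List.filter_append,
                      List.filter_cons, List.filter_cons,
                      if_neg (by simp; omega), if_neg (by simp; omega)] at hcp
                  exact hcp
              · have hpw := h.2
                rw [hSsplit] at hpw
                have hsub : (S₁ ++ S₂).Sublist (S₁ ++ x :: S₂) :=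
                  List.Sublist.append_left (List.sublist_cons_self x S₂) S₁
                exact hpw.sublist hsub
            show (match PySem.List.pop? T i' with
                  | none => []
                  | some (_, T') => best :: pvGoA t.toNat T') =
                 (match PySem.List.pop? S i with
                  | none => []
                  | some (x', S') => x' :: pvGoB n (t - 1) S')
            rw [hpopA, hpopB]
            show best :: pvGoA t.toNat (A₁ ++ A₂) = x :: pvGoB n (t - 1) (S₁ ++ S₂)
            rw [hbx]
            have hrec := ih (t - 1) (A₁ ++ A₂) (S₁ ++ S₂) hinv' (by omega)
            have hfueleq : (if t - 1 < 0 then 0 else (t - 1).toNat + 1) = t.toNat := by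
              split_ifs <;> omega
            rw [hfueleq] at hrec
            rw [hrec]

-- ===== VERDICT (by name: the statement is the Claim_ definition above) =====
theorem select_optimal_tasks_spec : Claim_equal_select_optimal_tasks := by
  intro T _ hpre
  unfold Spec_select_optimal_tasks
  unfold select_optimal_tasks select_optimal_tasks_alt
  obtain ⟨m, hm⟩ := pvMax2Some T hpre
  obtain ⟨t0, ht0⟩ : ∃ t0, PySem.List.max? (T.map (fun y : Int × Int => y.1)) (fun v => v) = some t0 := by
    cases hmx : PySem.List.max? (T.map (fun y : Int × Int => y.1)) (fun v => v) with
    | none => exact absurd ((PySem.List.max?_eq_none_iff _ _).mp hmx) (by simpa using hpre)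
    | some t0 => exact ⟨t0, rfl⟩
  have hm1 : m.1 = t0 := by
    obtain ⟨hmem, hmax2⟩ := pvMax2Fst T m hm
    obtain ⟨y0, hy0T, hy0⟩ : ∃ y0 ∈ T, y0.1 = t0 := List.mem_map.mp (PySem.List.max?_mem ht0)
    have h1 : t0 ≤ m.1 := hy0 ▸ hmax2 y0 hy0T
    have h2 : m.1 ≤ t0 := by
      simpa using PySem.List.max?_isMax ht0 _ (List.mem_map_of_mem hmem)
    omega
  rw [hm, ht0]
  show (if m.1 < 0 then [] else pvGoA (m.1.toNat + 1) T) =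
       pvGoB (t0.toNat + 1) t0 (PySem.List.sorted T (fun task => -task.2))
  have hinv : pvInv T (PySem.List.sorted T (fun task => -task.2)) := by
    constructor
    · intro p
      exact (pvSortedFilter T p).symm
    · exact PySem.List.sorted_pairwise T (fun task => -task.2)
  have hmain := pvGoEq (t0.toNat + 1) t0 T (PySem.List.sorted T (fun task => -task.2)) hinv (by omega)
  rw [hm1]
  by_cases hneg : t0 < 0
  · rw [if_pos hneg]
    rw [if_pos hneg] at hmain
    simpa [pvGoA] using hmain
  · rw [if_neg hneg]
    rw [if_neg hneg] at hmain
    exact hmain
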